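-- pv_equiv track=rewrite | github.com/AdienHuen/EmotionAnalysisForChineseNovel | Preprocessing.py | filter_tag
-- ===== SOURCE A (Python) =====
-- def filter_tag(rows = []):
--     contents = []
--     for row in rows:
--         row = row.replace(u"\t", u"").replace(u"\r", u"").\
--             replace(u"\n", u"").replace(u"    ", u"").\
--             replace(u" ", u"")
--         if row != u"":
--             contents.append(row)
--             # print row
--     # print ""
--     return contents
-- ===== SOURCE B (Python) =====
-- def filter_tag(rows = []):
--     drop = {"\t", "\r", "\n", " "}
--     contents = []
--     for row in rows:
--         cleaned = "".join(c for c in row if c not in drop)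
--         if cleaned != "":
--             contents.append(cleaned)
--     return contents
-- ===== Notes on version B (the rewrite author's own statement) =====
-- stated objective: simpler
-- what changed: Each row is cleaned in one character-level pass that keeps anything outside {tab, CR, LF, space}, instead of five successive full-string replace() rebuilds (including a redundant four-space replace).
import Mathlib
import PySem

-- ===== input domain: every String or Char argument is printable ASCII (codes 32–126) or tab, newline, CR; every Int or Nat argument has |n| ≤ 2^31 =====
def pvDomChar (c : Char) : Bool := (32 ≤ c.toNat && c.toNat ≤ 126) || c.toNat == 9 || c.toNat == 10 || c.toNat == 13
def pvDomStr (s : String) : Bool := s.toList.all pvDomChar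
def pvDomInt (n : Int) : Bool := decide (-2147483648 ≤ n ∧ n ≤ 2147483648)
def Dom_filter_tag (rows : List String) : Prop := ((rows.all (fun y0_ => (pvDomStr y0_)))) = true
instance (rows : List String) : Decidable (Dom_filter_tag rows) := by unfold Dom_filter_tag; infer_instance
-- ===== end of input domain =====

-- B cleans each row in one character-level pass dropping {tab, CR, LF, space} instead of A's five chained replace() rebuilds (objective: simpler).

-- ===== PORT A =====
-- the chained replaces of A, applied to one row
def cleanRowA (row : String) : String :=
  PySem.Str.replace
    (PySem.Str.replace
      (PySem.Str.replace
        (PySem.Str.replace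
          (PySem.Str.replace row "\t" "")
          "\r" "")
        "\n" "")
      "    " "")
    " " ""

def filter_tag (rows : List String) : List String :=
  rows.foldl (fun contents row =>
    let row' := cleanRowA row
    if row' ≠ "" then contents ++ [row'] else contents) []

-- ===== PORT B =====
def cleanRowB (row : String) : String :=
  String.ofList (row.toList.filter
    (fun c => !(c == '\t' || c == '\r' || c == '\n' || c == ' ')))

def filter_tag_alt (rows : List String) : List String :=
  rows.foldl (fun contents row =>
    let cleaned := cleanRowB row
    if cleaned ≠ "" then contents ++ [cleaned] else contents) []

-- ===== PRECONDITION & SPEC =====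
def Spec_filter_tag (rows : List String) (out : List String) : Prop := out = filter_tag_alt rows
instance (rows : List String) (out : List String) : Decidable (Spec_filter_tag rows out) := by unfold Spec_filter_tag; infer_instance

-- ===== CLAIM (what is proved, stated in full; the proofs are below) =====
def Claim_equal_filter_tag : Prop := ∀ (rows : List String), Dom_filter_tag rows → Spec_filter_tag rows (filter_tag rows)

-- ===== LEMMAS AND PROOFS =====

-- replacing a single character d by "" is exactly filtering d out
theorem replace_go_single (d : Char) :
    ∀ (fuel : Nat) (l acc : List Char), l.length ≤ fuel →
      PySem.Chars.replace.go [d] [] fuel l acc = acc.reverse ++ l.filter (· ≠ d) := by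
  intro fuel
  induction fuel with
  | zero =>
    intro l acc h
    have : l = [] := List.length_eq_zero_iff.mp (Nat.le_zero.mp h)
    subst this
    simp [PySem.Chars.replace.go]
  | succ n ih =>
    intro l acc h
    cases l with
    | nil => simp [PySem.Chars.replace.go]
    | cons c t =>
      by_cases hc : c = d
      · subst hc
        have hp : [c].isPrefixOf (c :: t) = true := by simp [List.isPrefixOf]
        simp only [PySem.Chars.replace.go, hp, if_pos, List.reverse_nil, List.nil_append]
        have ht : t.length ≤ n := by simp at h; omega
        have hd : (c :: t).drop [c].length = t := rfl
        rw [hd, ih t acc ht]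
        simp
      · have hp : [d].isPrefixOf (c :: t) = false := by
          simp [List.isPrefixOf]
          exact fun hdc => absurd hdc.symm hc
        simp only [PySem.Chars.replace.go, hp, Bool.false_eq_true, if_false]
        have ht : t.length ≤ n := by simp at h; omega
        rw [ih t (c :: acc) ht]
        simp [hc]

theorem replace_single (d : Char) (s : List Char) :
    PySem.Chars.replace s [d] [] = s.filter (· ≠ d) := by
  unfold PySem.Chars.replace
  simp only [List.isEmpty_cons, if_neg, Bool.false_eq_true, not_false_iff]
  simpa using replace_go_single d s.length s []

-- replacing a run of d's by "" does not change the d-free part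
theorem replace_go_spaces (d : Char) (old : List Char) (hne : old ≠ []) (hold : ∀ c ∈ old, c = d) :
    ∀ (fuel : Nat) (l acc : List Char), l.length ≤ fuel →
      (PySem.Chars.replace.go old [] fuel l acc).filter (· ≠ d)
        = acc.reverse.filter (· ≠ d) ++ l.filter (· ≠ d) := by
  intro fuel
  induction fuel with
  | zero =>
    intro l acc h
    have : l = [] := List.length_eq_zero_iff.mp (Nat.le_zero.mp h)
    subst this
    simp [PySem.Chars.replace.go]
  | succ n ih =>
    intro l acc h
    cases l with
    | nil => simp [PySem.Chars.replace.go]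
    | cons c t =>
      by_cases hp : old.isPrefixOf (c :: t) = true
      · simp only [PySem.Chars.replace.go, hp, if_pos, List.reverse_nil, List.nil_append]
        have hpre : old <+: (c :: t) := List.isPrefixOf_iff_prefix.mp hp
        obtain ⟨u, hu⟩ := hpre
        have hlen : old.length ≤ (c :: t).length := by
          rw [← hu]; simp
        have hdrop : (c :: t).drop old.length = u := by
          rw [← hu]; simp
        rw [hdrop]
        have hul : u.length ≤ n := by
          have hlu := congrArg List.length hu
          have hpos : 0 < old.length := List.length_pos_iff.mpr hne
          simp at hlu h
          omega
        have hof : old.filter (fun x => decide (x ≠ d)) = [] := by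
          rw [List.filter_eq_nil_iff]
          intro a ha
          simpa using hold a ha
        have hct : (c :: t).filter (fun x => decide (x ≠ d)) = u.filter (fun x => decide (x ≠ d)) := by
          rw [← hu, List.filter_append, hof, List.nil_append]
        rw [ih u acc hul, hct]
      · simp only [Bool.not_eq_true] at hp
        simp only [PySem.Chars.replace.go, hp, Bool.false_eq_true, if_false]
        have ht : t.length ≤ n := by simp at h; omega
        rw [ih t (c :: acc) ht]
        by_cases hc : c = d <;> simp [hc]

theorem replace_spaces (s : List Char) :
    (PySem.Chars.replace s [' ', ' ', ' ', ' '] []).filter (· ≠ ' ')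
      = s.filter (· ≠ ' ') := by
  unfold PySem.Chars.replace
  simp only [List.isEmpty_cons, if_neg, Bool.false_eq_true, not_false_iff]
  have := replace_go_spaces ' ' [' ', ' ', ' ', ' '] (by simp)
    (by intro c hc; fin_cases hc <;> rfl)
    s.length s [] (le_refl _)
  rw [this]
  simp

theorem cleanRow_eq (row : String) : cleanRowA row = cleanRowB row := by
  have h1 : ("\t" : String).toList = ['\t'] := rfl
  have h2 : ("\r" : String).toList = ['\r'] := rfl
  have h3 : ("\n" : String).toList = ['\n'] := rfl
  have h4 : ("    " : String).toList = [' ', ' ', ' ', ' '] := rfl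
  have h5 : (" " : String).toList = [' '] := rfl
  have h0 : ("" : String).toList = [] := rfl
  have hA : (cleanRowA row).toList
      = row.toList.filter (fun c => !(c == '\t' || c == '\r' || c == '\n' || c == ' ')) := by
    unfold cleanRowA
    simp only [PySem.Str.toList_replace]
    rw [h1, h2, h3, h4, h5, h0]
    rw [replace_single, replace_spaces, replace_single, replace_single, replace_single]
    rw [List.filter_filter, List.filter_filter, List.filter_filter]
    apply List.filter_congr
    intro c _
    by_cases a : c = '\t' <;> by_cases b : c = '\r' <;> by_cases n : c = '\n' <;>
      by_cases sp : c = ' ' <;> simp [a, b, n, sp]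
  unfold cleanRowB
  rw [← hA, String.ofList_toList]

-- ===== VERDICT (by name: the statement is the Claim_ definition above) =====
theorem filter_tag_spec : Claim_equal_filter_tag := by
  intro rows _
  unfold Spec_filter_tag filter_tag filter_tag_alt
  have hf : (fun (contents : List String) (row : String) =>
        let row' := cleanRowA row
        if row' ≠ "" then contents ++ [row'] else contents)
      = (fun (contents : List String) (row : String) =>
        let cleaned := cleanRowB row
        if cleaned ≠ "" then contents ++ [cleaned] else contents) := by
    funext contents row
    simp only [cleanRow_eq]
  rw [hf]
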